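-- pv_equiv track=rewrite | github.com/talhajamal11/mathematical_modelling | src/JP Morgan Quant Questions/maximum_index.py | solution
-- ===== SOURCE A (Python) =====
-- def solution(steps, bad_index):
--     max_index = (steps*(steps + 1))//2
--     while max_index > 0:
--         curr_index = max_index
--         for j in range(steps, -1, -1):
--             curr_index -= j
--             if curr_index in bad_index:
--                 # bad path
--                 break
--             if curr_index == 0:
--                 return max_index
--         max_index -= 1
--     return max_index
-- ===== SOURCE B (Python) =====
-- def solution(steps, bad_index):
--     # A start index m reaches 0 by descending steps, steps-1, ..., k exactly when
--     # m = T(steps) - T(k-1); only those O(steps) candidates need checking, largest first.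
--     if steps <= 0:
--         return 0
--     bad = set(bad_index)
--     total = steps * (steps + 1) // 2
--     for t in range(steps):
--         # candidate start index: total - T(t), strictly decreasing in t
--         if all((u * (u + 1) // 2 - t * (t + 1) // 2) not in bad for u in range(t, steps)):
--             return total - t * (t + 1) // 2
--     return 0
-- ===== Notes on version B (the rewrite author's own statement) =====
-- stated objective: faster
-- what changed: Instead of scanning every integer from steps*(steps+1)/2 down to 1 and simulating the whole descending walk for each (O(steps^3)), B enumerates only the O(steps) partial-sum start indices that can reach 0 exactly, checks each path once against a hash set of bad indices, and returns the first (largest) good one.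
import Mathlib
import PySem

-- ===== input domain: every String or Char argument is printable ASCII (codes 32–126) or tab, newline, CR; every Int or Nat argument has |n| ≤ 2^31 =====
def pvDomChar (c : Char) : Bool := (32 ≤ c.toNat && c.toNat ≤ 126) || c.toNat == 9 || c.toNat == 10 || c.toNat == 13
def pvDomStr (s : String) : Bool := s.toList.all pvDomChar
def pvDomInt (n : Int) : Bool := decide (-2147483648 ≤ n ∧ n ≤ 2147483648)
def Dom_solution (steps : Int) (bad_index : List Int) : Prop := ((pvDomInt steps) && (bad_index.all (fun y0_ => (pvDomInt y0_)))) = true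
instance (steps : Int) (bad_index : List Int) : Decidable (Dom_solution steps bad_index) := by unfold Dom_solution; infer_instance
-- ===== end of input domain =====

-- B replaces A's scan over every integer start index (each re-simulated from scratch, O(steps^3))
-- by a scan over only the O(steps) partial-sum candidates that can reach 0 (objective: faster).

-- ===== PORT A =====
-- inner 'for j in range(steps, -1, -1)' loop: returns true iff the loop hits 'return max_index'
def solInner (bad : List Int) : Int → List Int → Bool
  | _, [] => false
  | curr, j :: rest =>
    if bad.contains (curr - j) then false
    else if curr - j == 0 then true
    else solInner bad (curr - j) rest

-- outer 'while max_index > 0' loop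
def solLoop (steps : Int) (bad : List Int) (m : Int) : Int :=
  if h : 0 < m then
    if solInner bad m (PySem.List.pyRange steps (-1) (-1)) then m
    else solLoop steps bad (m - 1)
  else m
termination_by m.toNat
decreasing_by omega

def solution (steps : Int) (bad_index : List Int) : Int :=
  solLoop steps bad_index (PySem.Int.floordiv (steps * (steps + 1)) 2)

-- ===== PORT B =====
-- 'all(... not in bad for u in range(t, steps))'
def altGood (bad : PySem.Set Int) (steps t : Int) : Bool :=
  (PySem.List.pyRange t steps 1).all fun u =>
    !(PySem.Set.contains bad
        (PySem.Int.floordiv (u * (u + 1)) 2 - PySem.Int.floordiv (t * (t + 1)) 2))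

-- 'for t in range(steps): if all(...): return ...' ; fall through to 0
def altScan (bad : PySem.Set Int) (steps total : Int) : List Int → Int
  | [] => 0
  | t :: rest =>
    if altGood bad steps t then total - PySem.Int.floordiv (t * (t + 1)) 2
    else altScan bad steps total rest

def solution_alt (steps : Int) (bad_index : List Int) : Int :=
  if steps ≤ 0 then 0
  else
    altScan (PySem.Set.ofList bad_index) steps
      (PySem.Int.floordiv (steps * (steps + 1)) 2)
      (PySem.List.pyRange 0 steps 1)

-- ===== PRECONDITION & SPEC =====
def Spec_solution (steps : Int) (bad_index : List Int) (out : Int) : Prop := out = solution_alt steps bad_index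
instance (steps : Int) (bad_index : List Int) (out : Int) : Decidable (Spec_solution steps bad_index out) := by unfold Spec_solution; infer_instance

-- ===== CLAIM (what is proved, stated in full; the proofs are below) =====
def Claim_equal_solution : Prop := ∀ (steps : Int) (bad_index : List Int), Dom_solution steps bad_index → Spec_solution steps bad_index (solution steps bad_index)

-- ===== LEMMAS AND PROOFS =====

-- triangular number t*(t+1)/2 (exact: the product is even)
def triL (t : Int) : Int := t * (t + 1) / 2

lemma two_triL (t : Int) : 2 * triL t = t * (t + 1) := by
  have h : (2 : Int) ∣ t * (t + 1) := (Int.even_mul_succ_self t).two_dvd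
  exact Int.mul_ediv_cancel' h

lemma triL_floordiv (t : Int) : PySem.Int.floordiv (t * (t + 1)) 2 = triL t := by
  rw [PySem.Int.floordiv_eq_ediv_of_pos (by norm_num)]; rfl

lemma triL_succ (t : Int) : triL (t + 1) = triL t + (t + 1) := by
  have h1 := two_triL t
  have h2 := two_triL (t + 1)
  have h3 : (t + 1) * ((t + 1) + 1) = t * (t + 1) + 2 * (t + 1) := by ring
  linarith

lemma triL_mono {a b : Int} (ha : 0 ≤ a) (hab : a ≤ b) : triL a ≤ triL b := by
  have h1 := two_triL a
  have h2 := two_triL b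
  nlinarith [mul_nonneg (sub_nonneg.2 hab) (by linarith : (0:Int) ≤ b + a + 1)]

lemma triL_strict {a b : Int} (ha : 0 ≤ a) (hab : a < b) : triL a + (a + 1) ≤ triL b := by
  have h := triL_mono (by omega : (0:Int) ≤ a + 1) (by omega : a + 1 ≤ b)
  rw [triL_succ] at h; linarith

-- the countdown list range(n, -1, -1)
lemma cdown_zero : PySem.List.pyRange (0 : Int) (-1) (-1) = [0] := by
  rw [PySem.List.pyRange_neg_one_cons (by norm_num)]
  rw [show (0:Int) - 1 = -1 by ring, PySem.List.pyRange_neg_one_eq_nil (by norm_num)]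

lemma cdown_succ (n : Nat) :
    PySem.List.pyRange ((n : Int) + 1) (-1) (-1) = ((n : Int) + 1) :: PySem.List.pyRange (n : Int) (-1) (-1) := by
  rw [PySem.List.pyRange_neg_one_cons (by omega)]
  norm_num

lemma solInner_zero_list (bad : List Int) (curr : Int) (h : curr ≠ 0) :
    solInner bad curr [0] = false := by
  simp only [solInner, sub_zero]
  split
  · rfl
  · rw [if_neg (by simpa using h)]

lemma inner_neg (bad : List Int) : ∀ (n : Nat) (curr : Int), curr < 0 →
    solInner bad curr (PySem.List.pyRange (n : Int) (-1) (-1)) = false := by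
  intro n
  induction n with
  | zero =>
    intro curr hc
    rw [Nat.cast_zero, cdown_zero]
    exact solInner_zero_list bad curr (by omega)
  | succ k ih =>
    intro curr hc
    rw [Nat.cast_succ, cdown_succ]
    simp only [solInner]
    split
    · rfl
    · rw [if_neg (by simp only [beq_iff_eq]; omega)]
      exact ih _ (by omega)

-- characterization of the inner loop for a positive start index
lemma inner_char (bad : List Int) : ∀ (n : Nat) (curr : Int), 0 < curr →
    ((solInner bad curr (PySem.List.pyRange (n : Int) (-1) (-1)) = true) ↔
     ∃ t : Int, 0 ≤ t ∧ t < (n : Int) ∧ curr = triL (n : Int) - triL t ∧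
       ∀ u : Int, t ≤ u → u < (n : Int) → (triL u - triL t) ∉ bad) := by
  intro n
  induction n with
  | zero =>
    intro curr hc
    rw [Nat.cast_zero, cdown_zero]
    simp only [solInner, sub_zero]
    constructor
    · intro h
      exfalso
      split at h
      · exact Bool.false_ne_true h
      · rw [if_neg (by simp only [beq_iff_eq]; omega)] at h
        exact Bool.false_ne_true h
    · rintro ⟨t, ht0, htn, -, -⟩; omega
  | succ k ih =>
    intro curr hc
    rw [Nat.cast_succ, cdown_succ]
    simp only [solInner]
    set c := curr - ((k : Int) + 1) with hcdef
    by_cases hb : bad.contains c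
    · rw [if_pos hb]
      simp only [Bool.false_eq_true, false_iff]
      rintro ⟨t, ht0, htn, hcurr, hgood⟩
      have htk : t ≤ (k : Int) := by omega
      have : triL (k : Int) - triL t ∉ bad := hgood (k : Int) htk (by omega)
      have hce : c = triL (k : Int) - triL t := by
        have := triL_succ (k : Int); omega
      rw [List.contains_eq_mem, decide_eq_true_iff] at hb
      rw [hce] at hb; exact this hb
    · rw [if_neg hb]
      rw [List.contains_eq_mem] at hb
      have hbad : c ∉ bad := by simpa using hb
      by_cases hz : c = 0
      · rw [if_pos (by simp only [beq_iff_eq]; exact hz)]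
        constructor
        · intro _
          refine ⟨(k : Int), by omega, by omega, ?_, ?_⟩
          · have := triL_succ (k : Int); omega
          · intro u hu1 hu2
            have : u = (k : Int) := by omega
            subst this
            rw [sub_self, ← hz]; exact hbad
        · intro _; rfl
      · rw [if_neg (by simp only [beq_iff_eq]; exact hz)]
        rcases lt_or_gt_of_ne hz with hneg | hpos
        · rw [inner_neg bad k c hneg]
          simp only [Bool.false_eq_true, false_iff]
          rintro ⟨t, ht0, htn, hcurr, -⟩
          have : triL t ≤ triL (k : Int) := triL_mono ht0 (by omega)
          have := triL_succ (k : Int)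
          omega
        · rw [ih c hpos]
          constructor
          · rintro ⟨t, ht0, htn, hcc, hgood⟩
            refine ⟨t, ht0, by omega, ?_, ?_⟩
            · have := triL_succ (k : Int); omega
            · intro u hu1 hu2
              by_cases huk : u < (k : Int)
              · exact hgood u hu1 huk
              · have : u = (k : Int) := by omega
                subst this
                have : triL (k : Int) - triL t = c := by omega
                rw [this]; exact hbad
          · rintro ⟨t, ht0, htn, hcurr, hgood⟩
            have htk : t ≠ (k : Int) := by
              intro h; subst h
              have := triL_succ (k : Int); omega
            refine ⟨t, ht0, by omega, ?_, ?_⟩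
            · have := triL_succ (k : Int); omega
            · intro u hu1 hu2
              exact hgood u hu1 (by omega)

-- skip: between two consecutive candidates the outer loop finds nothing
lemma loop_skip (bad : List Int) (n k : Nat) (hk : k + 1 ≤ n) :
    ∀ (j : Nat) (m : Int), m = triL (n : Int) - triL ((k : Int) + 1) + j →
      m < triL (n : Int) - triL (k : Int) →
      solLoop (n : Int) bad m = solLoop (n : Int) bad (triL (n : Int) - triL ((k : Int) + 1)) := by
  intro j
  induction j with
  | zero => intro m hm _; rw [hm]; norm_num
  | succ i ih =>
    intro m hm hlt
    have hbase : 0 ≤ triL (n : Int) - triL ((k : Int) + 1) := by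
      have := triL_mono (by omega : (0:Int) ≤ (k : Int) + 1) (by omega : (k : Int) + 1 ≤ (n : Int))
      omega
    have hmpos : 0 < m := by omega
    rw [solLoop, dif_pos hmpos]
    have hfalse : solInner bad m (PySem.List.pyRange (n : Int) (-1) (-1)) = false := by
      rw [← Bool.not_eq_true, inner_char bad n m hmpos]
      rintro ⟨t, ht0, htn, hcurr, -⟩
      by_cases htk : t ≤ (k : Int)
      · have : triL t ≤ triL (k : Int) := triL_mono ht0 htk
        omega
      · have : triL ((k : Int) + 1) ≤ triL t := triL_mono (by omega) (by omega)
        omega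
    rw [hfalse]
    simp only [Bool.false_eq_true, if_false]
    exact ih (m - 1) (by omega) (by omega)

-- altGood computes the path-goodness predicate
lemma altGood_iff (bad : List Int) (n : Nat) (t : Int) :
    altGood (PySem.Set.ofList bad) (n : Int) t = true ↔
      ∀ u : Int, t ≤ u → u < (n : Int) → (triL u - triL t) ∉ bad := by
  unfold altGood
  rw [List.all_eq_true]
  constructor
  · intro h u hu1 hu2
    have hm : u ∈ PySem.List.pyRange t (n : Int) 1 := by
      rw [PySem.List.mem_pyRange_one]; exact ⟨hu1, hu2⟩
    have := h u hm
    simp only [triL_floordiv, Bool.not_eq_eq_eq_not, Bool.not_true] at this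
    intro hmem
    rw [← Bool.not_eq_true, PySem.Set.contains_iff, PySem.Set.mem_ofList] at this
    exact this hmem
  · intro h u hm
    rw [PySem.List.mem_pyRange_one] at hm
    have := h u hm.1 hm.2
    simp only [triL_floordiv, Bool.not_eq_eq_eq_not, Bool.not_true]
    rw [← Bool.not_eq_true, PySem.Set.contains_iff, PySem.Set.mem_ofList]
    exact this

-- main correspondence: loop from candidate k ↔ B's scan from t = k
lemma loop_eq (bad : List Int) (n : Nat) :
    ∀ (d k : Nat), k + d = n →
      solLoop (n : Int) bad (triL (n : Int) - triL (k : Int)) =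
        altScan (PySem.Set.ofList bad) (n : Int) (triL (n : Int)) (PySem.List.pyRange (k : Int) (n : Int) 1) := by
  intro d
  induction d with
  | zero =>
    intro k hk
    subst hk
    simp only [Nat.add_zero]
    rw [sub_self, solLoop, dif_neg (by omega)]
    rw [PySem.List.pyRange_one_eq_nil (le_refl _)]
    rfl
  | succ i ih =>
    intro k hk
    have hkn : k < n := by omega
    have hpos : 0 < triL (n : Int) - triL (k : Int) := by
      have := triL_strict (by omega : (0:Int) ≤ (k : Int)) (by omega : (k : Int) < (n : Int))
      omega
    rw [solLoop, dif_pos hpos]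
    rw [PySem.List.pyRange_one_cons (by omega : (k : Int) < (n : Int))]
    simp only [altScan]
    by_cases hG : ∀ u : Int, (k : Int) ≤ u → u < (n : Int) → (triL u - triL (k : Int)) ∉ bad
    · have hi : solInner bad (triL (n : Int) - triL (k : Int)) (PySem.List.pyRange (n : Int) (-1) (-1)) = true := by
        rw [inner_char bad n _ hpos]
        exact ⟨(k : Int), by omega, by omega, rfl, hG⟩
      rw [hi, if_pos rfl, if_pos ((altGood_iff bad n (k : Int)).2 hG)]
      rw [triL_floordiv]
    · have hi : solInner bad (triL (n : Int) - triL (k : Int)) (PySem.List.pyRange (n : Int) (-1) (-1)) = false := by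
        rw [← Bool.not_eq_true, inner_char bad n _ hpos]
        rintro ⟨t, ht0, htn, hcurr, hgood⟩
        have ht : t = (k : Int) := by
          by_cases h1 : t < (k : Int)
          · have := triL_strict ht0 h1
            have := triL_mono (by omega : (0:Int) ≤ (k:Int)) (by omega : (k : Int) ≤ (n : Int))
            omega
          · by_cases h2 : (k : Int) < t
            · have := triL_strict (by omega : (0:Int) ≤ (k:Int)) h2
              have := triL_mono ht0 (le_of_lt htn)
              omega
            · omega
        subst ht; exact hG hgood
      rw [hi]
      simp only [Bool.false_eq_true, if_false]
      have haG : altGood (PySem.Set.ofList bad) (n : Int) (k : Int) = false := by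
        rw [← Bool.not_eq_true, altGood_iff]; exact hG
      rw [haG]
      simp only [Bool.false_eq_true, if_false]
      have hstep : solLoop (n : Int) bad (triL (n : Int) - triL (k : Int) - 1) =
          solLoop (n : Int) bad (triL (n : Int) - triL ((k : Int) + 1)) := by
        have hsucc := triL_succ (k : Int)
        apply loop_skip bad n k hkn k
        · omega
        · omega
      rw [hstep]
      have := ih (k + 1) (by omega)
      rw [show ((k : Int) + 1) = ((k + 1 : Nat) : Int) by push_cast; ring]
      exact this

-- while-loop with an inner loop that never returns: result 0
lemma loop_zero_of_false (steps : Int) (bad : List Int)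
    (hf : ∀ m : Int, 0 < m → solInner bad m (PySem.List.pyRange steps (-1) (-1)) = false) :
    ∀ (f : Nat), solLoop steps bad (f : Int) = 0 := by
  intro f
  induction f with
  | zero => rw [solLoop]; norm_num
  | succ i ih =>
    rw [solLoop, dif_pos (by omega), hf _ (by omega)]
    simp only [Bool.false_eq_true, if_false]
    rw [show ((i + 1 : Nat) : Int) - 1 = (i : Int) by push_cast; ring]
    exact ih

-- ===== VERDICT (by name: the statement is the Claim_ definition above) =====
theorem solution_spec : Claim_equal_solution := by
  unfold Claim_equal_solution
  intro steps bad _dom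
  unfold Spec_solution solution solution_alt
  rw [triL_floordiv]
  by_cases hs : steps ≤ 0
  · rw [if_pos hs]
    have hnn : 0 ≤ triL steps := by
      have h2 := two_triL steps
      by_cases h : 0 ≤ steps
      · nlinarith
      · nlinarith [mul_nonneg (by omega : (0:Int) ≤ -steps) (by omega : (0:Int) ≤ -(steps + 1))]
    have hf : ∀ m : Int, 0 < m → solInner bad m (PySem.List.pyRange steps (-1) (-1)) = false := by
      intro m hm
      rcases lt_or_eq_of_le hs with h | h
      · rw [PySem.List.pyRange_neg_one_eq_nil (by omega)]
        rfl
      · subst h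
        rw [show ((0:Int)) = ((0 : Nat) : Int) by norm_num, Nat.cast_zero, cdown_zero]
        exact solInner_zero_list bad m (by omega)
    have := loop_zero_of_false steps bad hf (triL steps).toNat
    rw [Int.toNat_of_nonneg hnn] at this
    exact this
  · rw [if_neg hs]
    have hs' : 0 < steps := by omega
    set n := steps.toNat with hn
    have hsn : steps = (n : Int) := by omega
    rw [hsn]
    have := loop_eq bad n n 0 (by omega)
    simp only [Nat.cast_zero] at this
    rw [show triL 0 = 0 from rfl, sub_zero] at this
    exact this
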